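-- pv_equiv track=rewrite | github.com/gowthamm0708/ailab | 8Monkey.py | monkey
-- ===== SOURCE A (Python) =====
-- def monkey(n):
--     climb = 0
--     banana = 0
--     hungry = True
--
--     for i in range(n):
--         if hungry:
--             climb += 1
--             banana += 1
--             hungry = False
--         else:
--             climb += 1
--
--     return climb, banana
-- ===== SOURCE B (Python) =====
-- def monkey(n):
--     # closed form: each step climbs once; only the first step (if any) eats a banana
--     if n <= 0:
--         return 0, 0
--     return n, 1
-- ===== Notes on version B (the rewrite author's own statement) =====
-- stated objective: faster
-- what changed: Replaced the linear loop accumulating climb/banana with a constant-time closed form: climb equals the positive step count and banana records whether any step occurred.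
import Mathlib
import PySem

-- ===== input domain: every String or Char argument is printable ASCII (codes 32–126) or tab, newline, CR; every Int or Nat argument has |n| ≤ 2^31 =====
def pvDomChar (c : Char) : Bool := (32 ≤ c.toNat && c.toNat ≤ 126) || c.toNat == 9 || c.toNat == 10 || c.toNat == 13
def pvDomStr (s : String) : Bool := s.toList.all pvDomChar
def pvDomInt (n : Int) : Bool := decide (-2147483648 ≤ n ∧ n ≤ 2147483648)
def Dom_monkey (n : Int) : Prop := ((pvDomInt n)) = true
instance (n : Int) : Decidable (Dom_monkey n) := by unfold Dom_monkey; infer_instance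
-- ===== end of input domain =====

-- ===== PORT A =====
-- foldl over range(n) with state (climb, banana, hungry), as in A
def monkey (n : Int) : List Int :=
  let s := (PySem.List.pyRange 0 n 1).foldl
    (fun (st : Int × Int × Bool) _ =>
      let (climb, banana, hungry) := st
      if hungry then (climb + 1, banana + 1, false) else (climb + 1, banana, hungry))
    (0, 0, true)
  [s.1, s.2.1]

-- ===== PORT B =====
-- closed form
def monkey_alt (n : Int) : List Int :=
  if n ≤ 0 then [0, 0] else [n, 1]

-- ===== PRECONDITION & SPEC =====
def Spec_monkey (n : Int) (out : List Int) : Prop := out = monkey_alt n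
instance (n : Int) (out : List Int) : Decidable (Spec_monkey n out) := by unfold Spec_monkey; infer_instance

-- ===== CLAIM (what is proved, stated in full; the proofs are below) =====
def Claim_equal_monkey : Prop := ∀ (n : Int), Dom_monkey n → Spec_monkey n (monkey n)

-- ===== LEMMAS AND PROOFS =====
theorem monkey_foldl_false (xs : List Int) (c b : Int) :
    xs.foldl (fun (st : Int × Int × Bool) _ =>
      let (climb, banana, hungry) := st
      if hungry then (climb + 1, banana + 1, false) else (climb + 1, banana, hungry))
      (c, b, false) = (c + xs.length, b, false) := by
  induction xs generalizing c with
  | nil => simp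
  | cons x xs ih => simp [List.foldl, ih]; ring

theorem monkey_foldl_true (xs : List Int) (h : xs ≠ []) :
    xs.foldl (fun (st : Int × Int × Bool) _ =>
      let (climb, banana, hungry) := st
      if hungry then (climb + 1, banana + 1, false) else (climb + 1, banana, hungry))
      (0, 0, true) = ((xs.length : Int), 1, false) := by
  cases xs with
  | nil => exact absurd rfl h
  | cons x xs =>
    simp [List.foldl, monkey_foldl_false xs 1 1]; ring

-- ===== VERDICT (by name: the statement is the Claim_ definition above) =====
theorem monkey_spec : Claim_equal_monkey := by
  intro n _
  unfold Spec_monkey monkey monkey_alt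
  by_cases hn : n ≤ 0
  · have : PySem.List.pyRange 0 n 1 = [] := by
      simp [PySem.List.pyRange_one]
      omega
    simp [this, hn]
  · have hne : PySem.List.pyRange 0 n 1 ≠ [] := by
      have : (0 : Int) ∈ PySem.List.pyRange 0 n 1 := by
        rw [PySem.List.mem_pyRange_one]; omega
      intro h; rw [h] at this; simp at this
    have hlen : ((PySem.List.pyRange 0 n 1).length : Int) = n := by
      rw [PySem.List.length_pyRange_one]; omega
    simp [monkey_foldl_true _ hne, hn]
    omega
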